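-- pv_equiv track=rewrite | github.com/habvi/atcoder | ARC-Like/tenka1-2018/C_Align.py | make_seq
-- ===== SOURCE A (Python) =====
-- from collections import deque
--
-- def make_seq(A):
--     da = deque(A)
--     q = deque([da.popleft()])
--     front = 0
--     while da:
--         if len(da) == 1:
--             num = da.pop()
--             if abs(num - q[0]) > abs(num - q[-1]):
--                 q.appendleft(num)
--             else:
--                 q.append(num)
--             break
--
--         if front:
--             q.appendleft(da.popleft())
--             q.append(da.popleft())
--         else:
--             q.appendleft(da.pop())
--             q.append(da.pop())
--
--         front = 1 - front
--     return list(q)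
-- ===== SOURCE B (Python) =====
-- def make_seq(A):
--     n = len(A)
--     m = n - 1
--     t = m // 2
--     left = [A[n - 1 - j] if j % 2 == 0 else A[j] for j in range(t)]
--     right = [A[n - 2 - j] if j % 2 == 0 else A[j + 1] for j in range(t)]
--     res = left[::-1] + [A[0]] + right
--     if m % 2 == 1:
--         num = A[1 + 2 * (t // 2)]
--         if abs(num - res[0]) > abs(num - res[-1]):
--             res = [num] + res
--         else:
--             res = res + [num]
--     return res
-- ===== Notes on version B (the rewrite author's own statement) =====
-- stated objective: alternative
-- what changed: Replaces A's stepwise two-deque simulation by a closed-form index permutation: the two flanks are produced directly by comprehensions A[n-1-j]/A[j] and A[n-2-j]/A[j+1] over range((n-1)//2), and the single leftover element (index 1+2*(t//2), present only when n is even) is placed by one comparison; no deque, no per-step peeling loop.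
import Mathlib
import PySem

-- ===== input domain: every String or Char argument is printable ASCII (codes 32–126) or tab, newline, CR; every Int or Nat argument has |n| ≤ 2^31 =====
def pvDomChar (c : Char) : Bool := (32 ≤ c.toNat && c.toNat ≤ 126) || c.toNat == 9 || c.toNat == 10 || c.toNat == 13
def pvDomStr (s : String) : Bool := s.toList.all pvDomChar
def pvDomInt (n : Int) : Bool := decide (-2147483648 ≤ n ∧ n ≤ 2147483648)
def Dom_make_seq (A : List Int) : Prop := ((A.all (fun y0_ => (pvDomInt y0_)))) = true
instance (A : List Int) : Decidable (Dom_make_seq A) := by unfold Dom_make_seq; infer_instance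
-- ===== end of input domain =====

-- B replaces A's stepwise two-deque simulation by a closed-form index permutation:
-- the two flanks come from direct comprehensions over range((n-1)//2) and the single
-- leftover element is placed by one comparison (objective: alternative, same cost).

-- ===== PORT A =====
-- A's loop: da is the remaining deque, q the result deque (nonempty throughout, so
-- q[0]/q[-1] are rendered headD 0 / getLastD 0 — exact on every reachable state),
-- front the 0/1 toggle rendered as Bool.
def makeSeqLoopA (da q : List Int) (front : Bool) : List Int :=
  match da with
  | [] => q
  | [num] =>
      if (num - q.headD 0).natAbs > (num - q.getLastD 0).natAbs then num :: q
      else q ++ [num]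
  | a :: b :: rest =>
      if front then
        -- q.appendleft(da.popleft()); q.append(da.popleft())
        makeSeqLoopA rest ((a :: q) ++ [b]) false
      else
        -- q.appendleft(da.pop()); q.append(da.pop())
        makeSeqLoopA ((a :: b :: rest).dropLast.dropLast)
          (((a :: b :: rest).getLastD 0 :: q) ++ [(a :: b :: rest).dropLast.getLastD 0]) true
  termination_by da.length
  decreasing_by all_goals simp

-- da.popleft() on an empty A raises IndexError (excluded by Pre_); the [] arm is unreachable there.
def make_seq (A : List Int) : List Int :=
  match A with
  | [] => []
  | a :: rest => makeSeqLoopA rest [a] false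

-- ===== PORT B =====
-- B: n, m, t as in Source B; the two comprehensions become maps over pyRange; A[...] with
-- in-range indices is rendered pyGetD _ _ 0 (exact there); res[0]/res[-1] via pyGetD.
-- A[0] on an empty A raises IndexError (excluded by Pre_); the [] arm is unreachable there.
def make_seq_alt (A : List Int) : List Int :=
  match A with
  | [] => []
  | _ :: _ =>
    let n : Int := A.length
    let m : Int := n - 1
    let t : Int := PySem.Int.floordiv m 2
    let left := (PySem.List.pyRange 0 t 1).map (fun j =>
      if PySem.Int.mod j 2 = 0 then PySem.List.pyGetD A (n - 1 - j) 0
      else PySem.List.pyGetD A j 0)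
    let right := (PySem.List.pyRange 0 t 1).map (fun j =>
      if PySem.Int.mod j 2 = 0 then PySem.List.pyGetD A (n - 2 - j) 0
      else PySem.List.pyGetD A (j + 1) 0)
    let res := left.reverse ++ [PySem.List.pyGetD A 0 0] ++ right
    if PySem.Int.mod m 2 = 1 then
      let num := PySem.List.pyGetD A (1 + 2 * PySem.Int.floordiv t 2) 0
      if (num - PySem.List.pyGetD res 0 0).natAbs > (num - PySem.List.pyGetD res (-1) 0).natAbs
      then num :: res
      else res ++ [num]
    else res

-- ===== PRECONDITION & SPEC =====
-- Pre_ excludes only the empty list, on which both A and B raise IndexError.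
def Pre_make_seq (A : List Int) : Prop := A ≠ []
instance (A : List Int) : Decidable (Pre_make_seq A) := by unfold Pre_make_seq; infer_instance
def pvWitness_make_seq : List Int := [3, 1, 4, 1, 5]

def Spec_make_seq (A : List Int) (out : List Int) : Prop := out = make_seq_alt A
instance (A : List Int) (out : List Int) : Decidable (Spec_make_seq A out) := by unfold Spec_make_seq; infer_instance

-- ===== CLAIM (what is proved, stated in full; the proofs are below) =====
def Claim_equal_make_seq : Prop := ∀ (A : List Int), Dom_make_seq A → Pre_make_seq A → Spec_make_seq A (make_seq A)

-- ===== LEMMAS AND PROOFS =====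

-- Proof-only intermediate loop: A's loop expressed on the explicit window A[1:].
def seqLoopW (w left right : List Int) (tf : Bool) (c : Int) : List Int × List Int :=
  if 2 ≤ w.length then
    if tf then
      seqLoopW (w.drop 2) (left ++ [w.headD 0]) (right ++ [w.tail.headD 0]) false c
    else
      seqLoopW (w.dropLast.dropLast) (left ++ [w.getLastD 0]) (right ++ [w.dropLast.getLastD 0]) true c
  else if w.length = 1 then
    let num := w.headD 0
    let curLeft := left.getLastD c
    let curRight := right.getLastD c
    if (num - curLeft).natAbs > (num - curRight).natAbs then (left ++ [num], right)
    else (left, right ++ [num])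
  else (left, right)
  termination_by w.length
  decreasing_by all_goals simp_all; omega

lemma loopA_eq_loopW (n : Nat) : ∀ (w : List Int), w.length ≤ n →
    ∀ (left right : List Int) (tf : Bool) (c : Int),
    makeSeqLoopA w (left.reverse ++ c :: right) tf =
      (seqLoopW w left right tf c).1.reverse ++ c :: (seqLoopW w left right tf c).2 := by
  induction n with
  | zero =>
      intro w hw
      have : w = [] := List.eq_nil_of_length_eq_zero (Nat.le_zero.mp hw)
      subst this
      intro left right tf c
      simp [makeSeqLoopA, seqLoopW]
  | succ n ih =>
      intro w hw left right tf c
      match w with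
      | [] => simp [makeSeqLoopA, seqLoopW]
      | [num] =>
          rw [makeSeqLoopA, seqLoopW]
          norm_num
          have hgl : (c :: right).getLast?.getD (left.head?.getD 0) = right.getLastD c := by
            induction right using List.reverseRecOn with
            | nil => simp
            | append_singleton r' y _ =>
                rw [show c :: (r' ++ [y]) = (c :: r') ++ [y] by simp, List.getLast?_concat,
                  List.getLastD_concat]
                simp
          rw [hgl]
          simp only [List.getLastD_eq_getLast?]
          split <;> simp
      | a :: b :: rest =>
          rw [makeSeqLoopA, seqLoopW]
          rw [if_pos (show 2 ≤ (a :: b :: rest).length by simp)]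
          cases tf with
          | true =>
              rw [if_pos rfl, if_pos rfl]
              have h1 : a :: (left.reverse ++ c :: right) ++ [b] =
                  (left ++ [a]).reverse ++ c :: (right ++ [b]) := by simp
              rw [h1]
              have h2 := ih rest (by simp at hw; omega) (left ++ [a]) (right ++ [b]) false c
              simpa using h2
          | false =>
              rw [if_neg (by simp), if_neg (by simp)]
              have h1 : (a :: b :: rest).getLastD 0 :: (left.reverse ++ c :: right) ++
                  [(a :: b :: rest).dropLast.getLastD 0] =
                  (left ++ [(a :: b :: rest).getLastD 0]).reverse ++ c ::
                    (right ++ [(a :: b :: rest).dropLast.getLastD 0]) := by simp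
              rw [h1]
              exact ih ((a :: b :: rest).dropLast.dropLast)
                (by simp at hw ⊢; omega)
                (left ++ [(a :: b :: rest).getLastD 0])
                (right ++ [(a :: b :: rest).dropLast.getLastD 0]) true c

def cfL (w : List Int) (tf : Bool) : List Int :=
  (List.range (w.length / 2)).map (fun j =>
    if tf then (if j % 2 = 0 then w.getD j 0 else w.getD (w.length - j) 0)
    else (if j % 2 = 0 then w.getD (w.length - 1 - j) 0 else w.getD (j - 1) 0))

def cfR (w : List Int) (tf : Bool) : List Int :=
  (List.range (w.length / 2)).map (fun j =>
    if tf then (if j % 2 = 0 then w.getD (j + 1) 0 else w.getD (w.length - 1 - j) 0)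
    else (if j % 2 = 0 then w.getD (w.length - 2 - j) 0 else w.getD j 0))

def lidx (m : Nat) (tf : Bool) : Nat := if tf then 2 * (((m + 1) / 2) / 2) else 2 * ((m / 2) / 2)

lemma getD_take (w : List Int) (k i : Nat) (d : Int) (h : i < k) :
    (w.take k).getD i d = w.getD i d := by
  rw [List.getD_eq_getElem?_getD, List.getD_eq_getElem?_getD, List.getElem?_take, if_pos h]

lemma getD_drop (w : List Int) (k i : Nat) (d : Int) :
    (w.drop k).getD i d = w.getD (k + i) d := by
  simp [List.getD_eq_getElem?_getD, List.getElem?_drop]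

lemma getLastD_eq_getD (w : List Int) (d : Int) : w.getLastD d = w.getD (w.length - 1) d := by
  rw [List.getLastD_eq_getLast?, List.getLast?_eq_getElem?, List.getD_eq_getElem?_getD]

lemma headD_eq_getD (w : List Int) (d : Int) : w.headD d = w.getD 0 d := by
  rw [List.headD_eq_head?, List.head?_eq_getElem?, List.getD_eq_getElem?_getD]

lemma tail_headD_eq_getD (w : List Int) (d : Int) : w.tail.headD d = w.getD 1 d := by
  rw [List.headD_eq_head?, List.head?_eq_getElem?, List.getElem?_tail,
    List.getD_eq_getElem?_getD]

lemma dd_eq_take (w : List Int) : w.dropLast.dropLast = w.take (w.length - 2) := by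
  rw [List.dropLast_eq_take, List.dropLast_eq_take, List.take_take, List.length_take]
  congr 1
  omega

lemma cfL_false_step (w : List Int) (h : 2 ≤ w.length) :
    cfL w false = w.getD (w.length - 1) 0 :: cfL (w.take (w.length - 2)) true := by
  unfold cfL
  have hlen : (w.take (w.length - 2)).length = w.length - 2 := by simp
  rw [hlen]
  have h2 : w.length / 2 = (w.length - 2) / 2 + 1 := by omega
  rw [h2, List.range_succ_eq_map, List.map_cons, List.map_map]
  simp only [Bool.false_eq_true, if_false, if_true]
  congr 1
  apply List.map_congr_left
  intro j hj
  simp only [List.mem_range] at hj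
  simp only [Function.comp, Nat.succ_eq_add_one]
  by_cases hp : j % 2 = 0
  · rw [if_neg (by omega), if_pos hp, Nat.add_sub_cancel, getD_take _ _ _ _ (by omega)]
  · rw [if_pos (by omega), if_neg hp,
      show w.length - 1 - (j + 1) = w.length - 2 - j by omega,
      getD_take _ _ _ _ (by omega)]

lemma cfR_false_step (w : List Int) (h : 2 ≤ w.length) :
    cfR w false = w.getD (w.length - 2) 0 :: cfR (w.take (w.length - 2)) true := by
  unfold cfR
  have hlen : (w.take (w.length - 2)).length = w.length - 2 := by simp
  rw [hlen]
  have h2 : w.length / 2 = (w.length - 2) / 2 + 1 := by omega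
  rw [h2, List.range_succ_eq_map, List.map_cons, List.map_map]
  simp only [Bool.false_eq_true, if_false, if_true]
  congr 1
  apply List.map_congr_left
  intro j hj
  simp only [List.mem_range] at hj
  simp only [Function.comp, Nat.succ_eq_add_one]
  by_cases hp : j % 2 = 0
  · rw [if_neg (by omega), if_pos hp, getD_take _ _ _ _ (by omega)]
  · rw [if_pos (by omega), if_neg hp,
      show w.length - 2 - (j + 1) = w.length - 2 - 1 - j by omega,
      getD_take _ _ _ _ (by omega)]

lemma cfL_true_step (w : List Int) (h : 2 ≤ w.length) :
    cfL w true = w.getD 0 0 :: cfL (w.drop 2) false := by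
  unfold cfL
  have hlen : (w.drop 2).length = w.length - 2 := by simp
  rw [hlen]
  have h2 : w.length / 2 = (w.length - 2) / 2 + 1 := by omega
  rw [h2, List.range_succ_eq_map, List.map_cons, List.map_map]
  simp only [Bool.false_eq_true, if_false, if_true]
  congr 1
  apply List.map_congr_left
  intro j hj
  simp only [List.mem_range] at hj
  simp only [Function.comp, Nat.succ_eq_add_one]
  by_cases hp : j % 2 = 0
  · rw [if_neg (by omega), if_pos hp, getD_drop,
      show w.length - (j + 1) = 2 + (w.length - 2 - 1 - j) by omega]
  · rw [if_pos (by omega), if_neg hp, getD_drop,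
      show (j + 1 : Nat) = 2 + (j - 1) by omega]

lemma cfR_true_step (w : List Int) (h : 2 ≤ w.length) :
    cfR w true = w.getD 1 0 :: cfR (w.drop 2) false := by
  unfold cfR
  have hlen : (w.drop 2).length = w.length - 2 := by simp
  rw [hlen]
  have h2 : w.length / 2 = (w.length - 2) / 2 + 1 := by omega
  rw [h2, List.range_succ_eq_map, List.map_cons, List.map_map]
  simp only [Bool.false_eq_true, if_false, if_true]
  congr 1
  apply List.map_congr_left
  intro j hj
  simp only [List.mem_range] at hj
  simp only [Function.comp, Nat.succ_eq_add_one]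
  by_cases hp : j % 2 = 0
  · rw [if_neg (by omega), if_pos hp, getD_drop,
      show w.length - 1 - (j + 1) = 2 + (w.length - 2 - 2 - j) by omega]
  · rw [if_pos (by omega), if_neg hp, getD_drop,
      show (j + 1 + 1 : Nat) = 2 + j by omega]

lemma seqLoopW_char (n : Nat) : ∀ w : List Int, w.length ≤ n →
    ∀ (left right : List Int) (tf : Bool) (c : Int),
    seqLoopW w left right tf c =
      if w.length % 2 = 1 then
        (if (w.getD (lidx w.length tf) 0 - (left ++ cfL w tf).getLastD c).natAbs >
            (w.getD (lidx w.length tf) 0 - (right ++ cfR w tf).getLastD c).natAbs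
         then (left ++ cfL w tf ++ [w.getD (lidx w.length tf) 0], right ++ cfR w tf)
         else (left ++ cfL w tf, right ++ cfR w tf ++ [w.getD (lidx w.length tf) 0]))
      else (left ++ cfL w tf, right ++ cfR w tf) := by
  induction n with
  | zero =>
      intro w hw left right tf c
      have hw0 : w = [] := List.eq_nil_of_length_eq_zero (Nat.le_zero.mp hw)
      subst hw0
      simp [seqLoopW, cfL, cfR]
  | succ n ih =>
      intro w hw left right tf c
      by_cases h2 : 2 ≤ w.length
      · rw [seqLoopW, if_pos h2]
        cases tf with
        | false =>
            rw [if_neg (by simp)]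
            rw [dd_eq_take, getLastD_eq_getD, List.dropLast_eq_take, getLastD_eq_getD]
            have hlt : (w.take (w.length - 1)).length = w.length - 1 := by simp
            rw [hlt, getD_take _ _ _ _ (by omega),
              show w.length - 1 - 1 = w.length - 2 by omega]
            have hlen2 : (w.take (w.length - 2)).length = w.length - 2 := by simp
            rw [ih _ (by simp; omega)]
            rw [hlen2]
            rw [cfL_false_step w h2, cfR_false_step w h2]
            have hmod : (w.length - 2) % 2 = 1 ↔ w.length % 2 = 1 := by omega
            by_cases hodd : w.length % 2 = 1
            · rw [if_pos (hmod.mpr hodd), if_pos hodd]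
              rw [getD_take _ _ _ _ (show lidx (w.length - 2) true < w.length - 2 by
                    unfold lidx; simp; omega),
                show lidx (w.length - 2) true = lidx w.length false by unfold lidx; simp; omega]
              simp [List.append_assoc]
            · rw [if_neg (fun hh => hodd (hmod.mp hh)), if_neg hodd]
              simp [List.append_assoc]
        | true =>
            rw [if_pos rfl]
            rw [headD_eq_getD, tail_headD_eq_getD]
            have hlen2 : (w.drop 2).length = w.length - 2 := by simp
            rw [ih _ (by simp; omega)]
            rw [hlen2]
            rw [cfL_true_step w h2, cfR_true_step w h2]
            have hmod : (w.length - 2) % 2 = 1 ↔ w.length % 2 = 1 := by omega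
            by_cases hodd : w.length % 2 = 1
            · rw [if_pos (hmod.mpr hodd), if_pos hodd]
              rw [getD_drop,
                show 2 + lidx (w.length - 2) false = lidx w.length true by
                  unfold lidx; simp; omega]
              simp [List.append_assoc]
            · rw [if_neg (fun hh => hodd (hmod.mp hh)), if_neg hodd]
              simp [List.append_assoc]
      · match w, h2 with
        | [], _ => simp [seqLoopW, cfL, cfR]
        | [x], _ =>
            rw [seqLoopW]
            simp [cfL, cfR, lidx]
        | _ :: _ :: _, h2 => exact absurd (by simp) h2

lemma getD0_mid (L : List Int) (c : Int) (R : List Int) :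
    (L.reverse ++ [c] ++ R).getD 0 0 = L.getLastD c := by
  induction L using List.reverseRecOn with
  | nil => simp
  | append_singleton l x _ => simp

lemma pyGetD_neg1_mid (X : List Int) (c : Int) (R : List Int) :
    PySem.List.pyGetD (X ++ [c] ++ R) (-1) 0 = R.getLastD c := by
  induction R using List.reverseRecOn with
  | nil => simp [PySem.List.pyGetD_neg_one_append_singleton]
  | append_singleton r y _ =>
      rw [show X ++ [c] ++ (r ++ [y]) = (X ++ [c] ++ r) ++ [y] by simp,
        PySem.List.pyGetD_neg_one_append_singleton, List.getLastD_concat]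

lemma alt_left_bridge (c : Int) (w : List Int) :
    ((PySem.List.pyRange 0 ((w.length / 2 : Nat) : Int) 1).map (fun j =>
      if PySem.Int.mod j 2 = 0 then PySem.List.pyGetD (c :: w) ((w.length : Int) - j) 0
      else PySem.List.pyGetD (c :: w) j 0)) = cfL w false := by
  rw [PySem.List.pyRange_one, List.map_map]
  unfold cfL
  rw [show ((((w.length / 2 : Nat) : Int)) - 0).toNat = w.length / 2 by omega]
  apply List.map_congr_left
  intro k hk
  simp only [List.mem_range] at hk
  have hkl : k < w.length := by omega
  simp only [Function.comp, zero_add]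
  have hmod : PySem.Int.mod ((k : Nat) : Int) 2 = ((k % 2 : Nat) : Int) := by
    exact_mod_cast PySem.Int.mod_natCast k 2
  by_cases hp : k % 2 = 0
  · rw [if_pos (by rw [hmod]; exact_mod_cast congrArg (Nat.cast (R := Int)) hp),
      if_pos hp,
      show ((w.length : Int) - (k : Int)) = ((w.length - k : Nat) : Int) by omega,
      PySem.List.pyGetD_natCast,
      show w.length - k = (w.length - 1 - k) + 1 by omega, List.getD_cons_succ]
    simp [hp]
  · have h1 : 1 ≤ k := by omega
    rw [if_neg (by rw [hmod]; intro hh; exact hp (by exact_mod_cast hh)),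
      if_neg hp, PySem.List.pyGetD_natCast,
      show (k : Nat) = (k - 1) + 1 by omega, List.getD_cons_succ]
    rw [show k - 1 + 1 = k by omega]
    simp [hp]

lemma alt_right_bridge (c : Int) (w : List Int) :
    ((PySem.List.pyRange 0 ((w.length / 2 : Nat) : Int) 1).map (fun j =>
      if PySem.Int.mod j 2 = 0 then PySem.List.pyGetD (c :: w) ((w.length : Int) - 1 - j) 0
      else PySem.List.pyGetD (c :: w) (j + 1) 0)) = cfR w false := by
  rw [PySem.List.pyRange_one, List.map_map]
  unfold cfR
  rw [show ((((w.length / 2 : Nat) : Int)) - 0).toNat = w.length / 2 by omega]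
  apply List.map_congr_left
  intro k hk
  simp only [List.mem_range] at hk
  have hkl : 1 ≤ w.length - 1 - k := by omega
  simp only [Function.comp, zero_add]
  have hmod : PySem.Int.mod ((k : Nat) : Int) 2 = ((k % 2 : Nat) : Int) := by
    exact_mod_cast PySem.Int.mod_natCast k 2
  by_cases hp : k % 2 = 0
  · rw [if_pos (by rw [hmod]; exact_mod_cast congrArg (Nat.cast (R := Int)) hp),
      if_pos hp,
      show ((w.length : Int) - 1 - (k : Int)) = ((w.length - 1 - k : Nat) : Int) by omega,
      PySem.List.pyGetD_natCast,
      show w.length - 1 - k = (w.length - 2 - k) + 1 by omega, List.getD_cons_succ]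
    simp [hp]
  · rw [if_neg (by rw [hmod]; intro hh; exact hp (by exact_mod_cast hh)),
      if_neg hp,
      show ((k : Int) + 1) = ((k + 1 : Nat) : Int) by omega,
      PySem.List.pyGetD_natCast, List.getD_cons_succ]
    simp [hp]

lemma alt_eq (c : Int) (w : List Int) :
    make_seq_alt (c :: w) =
      if w.length % 2 = 1 then
        (if (w.getD (lidx w.length false) 0 - (cfL w false).getLastD c).natAbs >
            (w.getD (lidx w.length false) 0 - (cfR w false).getLastD c).natAbs
         then w.getD (lidx w.length false) 0 :: ((cfL w false).reverse ++ [c] ++ cfR w false)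
         else ((cfL w false).reverse ++ [c] ++ cfR w false) ++ [w.getD (lidx w.length false) 0])
      else (cfL w false).reverse ++ [c] ++ cfR w false := by
  simp only [make_seq_alt]
  rw [show (((c :: w).length : Int)) - 1 = (w.length : Int) by push_cast [List.length_cons]; ring]
  rw [show (((c :: w).length : Int)) - 2 = ((w.length : Int)) - 1 by push_cast [List.length_cons]; ring]
  rw [show PySem.Int.floordiv ((w.length : Int)) 2 = ((w.length / 2 : Nat) : Int) from by
    exact_mod_cast PySem.Int.floordiv_natCast w.length 2]
  rw [alt_left_bridge, alt_right_bridge, PySem.List.pyGetD_zero_cons]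
  rw [show PySem.Int.floordiv (((w.length / 2 : Nat) : Int)) 2 = ((w.length / 2 / 2 : Nat) : Int) from by
    exact_mod_cast PySem.Int.floordiv_natCast (w.length / 2) 2]
  rw [show (1 + 2 * ((w.length / 2 / 2 : Nat) : Int)) = ((1 + 2 * (w.length / 2 / 2) : Nat) : Int) by
    push_cast; ring]
  rw [PySem.List.pyGetD_natCast,
    show (1 + 2 * (w.length / 2 / 2) : Nat) = 2 * (w.length / 2 / 2) + 1 by ring,
    List.getD_cons_succ]
  rw [PySem.List.pyGetD_zero, getD0_mid, pyGetD_neg1_mid]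
  have hmodlen : PySem.Int.mod ((w.length : Nat) : Int) 2 = ((w.length % 2 : Nat) : Int) := by
    exact_mod_cast PySem.Int.mod_natCast w.length 2
  have hlidx : lidx w.length false = 2 * (w.length / 2 / 2) := by unfold lidx; simp
  by_cases hodd : w.length % 2 = 1
  · rw [if_pos (by rw [hmodlen, hodd]; rfl), if_pos hodd, hlidx]
  · rw [if_neg (by rw [hmodlen]; intro hh; exact hodd (by exact_mod_cast hh)), if_neg hodd]

-- ===== VERDICT (by name: the statement is the Claim_ definition above) =====
theorem make_seq_spec : Claim_equal_make_seq := by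
  intro A _ hpre
  unfold Spec_make_seq
  match A with
  | [] => exact absurd rfl hpre
  | c :: w =>
      have hA : make_seq (c :: w) =
          (seqLoopW w [] [] false c).1.reverse ++ c :: (seqLoopW w [] [] false c).2 := by
        have h := loopA_eq_loopW w.length w le_rfl [] [] false c
        simpa [make_seq] using h
      rw [hA, seqLoopW_char w.length w le_rfl, alt_eq]
      by_cases hodd : w.length % 2 = 1
      · rw [if_pos hodd, if_pos hodd]
        simp only [List.nil_append]
        split_ifs with h
        · simp
        · simp
      · rw [if_neg hodd, if_neg hodd]
        simp
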